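-- pv_equiv track=rewrite | github.com/SOOJEONGKIMM/Keyword_Extraction_Economics | Postprocess.py | untokenizing
-- ===== SOURCE A (Python) =====
-- def untokenizing(tokenized_text, idx):
--     """
--     report = ""
--     for ss in tokenized_text:
--         if not ss.startswith('##'):
--             report += ' ' + ss
--         else:
--             report += ss[2:]
--     return report.strip()
--     """
--     l = 0
--     text = []
--     tmp_ = ""
--     for i in idx:
--       if i == True:
--         if tmp_ == "":
--           tmp_ = str(tokenized_text[l])
--         else:
--           tmp_ += ' ' + str(tokenized_text[l])
--         l = l+1
--       else:
--         if tmp_ != "":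
--           text.append(tmp_.strip())
--           tmp_ = ""
--     if tmp_ != "":
--       text.append(tmp_.strip())
--     return text
-- ===== SOURCE B (Python) =====
-- from itertools import groupby
--
-- def untokenizing(tokenized_text, idx):
--     out = []
--     l = 0
--     for key, run in groupby(idx, key=lambda x: x == True):
--         n = sum(1 for _ in run)
--         if key:
--             toks = [tokenized_text[l + j] for j in range(n)]
--             if any(t != "" for t in toks):
--                 out.append(' '.join(toks).strip())
--             l += n
--     return out
-- ===== Notes on version B (the rewrite author's own statement) =====
-- stated objective: alternative
-- what changed: Replaces A's one-token-at-a-time state machine (growing a tmp string and flushing it on False flags) by an itertools.groupby decomposition: idx is partitioned into maximal runs, and each True-run's tokens are fetched and joined in a single ' '.join, skipping runs with no non-empty token.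
import Mathlib
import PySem

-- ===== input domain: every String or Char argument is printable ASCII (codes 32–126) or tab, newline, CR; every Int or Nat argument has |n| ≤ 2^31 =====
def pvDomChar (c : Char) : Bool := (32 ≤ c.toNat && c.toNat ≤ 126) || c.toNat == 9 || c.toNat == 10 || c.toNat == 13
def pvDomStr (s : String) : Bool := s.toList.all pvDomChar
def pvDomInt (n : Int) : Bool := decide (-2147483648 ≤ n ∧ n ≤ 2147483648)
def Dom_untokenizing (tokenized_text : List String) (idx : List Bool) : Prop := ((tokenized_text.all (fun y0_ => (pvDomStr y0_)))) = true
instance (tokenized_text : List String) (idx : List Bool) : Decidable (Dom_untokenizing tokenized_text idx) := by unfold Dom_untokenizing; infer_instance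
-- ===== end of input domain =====

-- B re-implements A by a different decomposition: groupby-style maximal runs of idx, each
-- True-run's tokens joined in one go, instead of A's string-accumulator state machine
-- (objective: alternative; no speed claim).

-- ===== PORT A =====
-- transliteration of A's loop: state (l, text, tmp_); an out-of-range token index is defaulted
-- to "" here — Pre_ excludes exactly the inputs where the Python raises IndexError
def untokenizing (tokenized_text : List String) (idx : List Bool) : List String :=
  let st := idx.foldl (fun (st : Int × List String × String) i =>
      if i == true then
        (st.1 + 1, st.2.1,
          if st.2.2 == "" then (PySem.List.pyGet? tokenized_text st.1).getD ""
          else st.2.2 ++ " " ++ (PySem.List.pyGet? tokenized_text st.1).getD "")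
      else
        if st.2.2 != "" then (st.1, st.2.1 ++ [PySem.Str.strip st.2.2], "")
        else st)
    ((0 : Int), ([] : List String), "")
  if st.2.2 != "" then st.2.1 ++ [PySem.Str.strip st.2.2] else st.2.1

-- ===== PORT B =====
-- groupby(idx, key = x == True): pvTakeRun peels the remainder of the current maximal run
def pvTakeRun (x : Bool) : List Bool → Nat × List Bool
  | [] => (0, [])
  | y :: ys => if y == x then ((pvTakeRun x ys).1 + 1, (pvTakeRun x ys).2) else (0, y :: ys)

lemma pvTakeRun_len (x : Bool) (ys : List Bool) : (pvTakeRun x ys).2.length ≤ ys.length := by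
  induction ys with
  | nil => simp [pvTakeRun]
  | cons y ys ih =>
    simp only [pvTakeRun]
    split
    · exact ih.trans (by simp)
    · simp

-- B's loop over groupby's (key, run) pairs, with token cursor l
def pvGoB (tt : List String) : List Bool → Int → List String
  | [], _ => []
  | x :: xs, l =>
    let n : Nat := (pvTakeRun x xs).1 + 1
    if x == true then
      let toks := (List.range n).map (fun (j : Nat) => (PySem.List.pyGet? tt (l + (j : Int))).getD "")
      (if toks.any (fun t => t != "") then [PySem.Str.strip (PySem.Str.join " " toks)] else [])
        ++ pvGoB tt (pvTakeRun x xs).2 (l + (n : Int))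
    else pvGoB tt (pvTakeRun x xs).2 l
  termination_by xs _ => xs.length
  decreasing_by
    · exact Nat.lt_succ_of_le (pvTakeRun_len _ _)
    · exact Nat.lt_succ_of_le (pvTakeRun_len _ _)

def untokenizing_alt (tokenized_text : List String) (idx : List Bool) : List String :=
  pvGoB tokenized_text idx 0

-- ===== PRECONDITION & SPEC =====
-- Pre_ excludes exactly the inputs where A raises IndexError: more True flags than tokens
def Pre_untokenizing (tokenized_text : List String) (idx : List Bool) : Prop :=
  idx.count true ≤ tokenized_text.length
instance (tokenized_text : List String) (idx : List Bool) : Decidable (Pre_untokenizing tokenized_text idx) := by unfold Pre_untokenizing; infer_instance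
def pvWitness_untokenizing : List String × List Bool := (["hello", "world"], [true, false, true])

def Spec_untokenizing (tokenized_text : List String) (idx : List Bool) (out : List String) : Prop := out = untokenizing_alt tokenized_text idx
instance (tokenized_text : List String) (idx : List Bool) (out : List String) : Decidable (Spec_untokenizing tokenized_text idx out) := by unfold Spec_untokenizing; infer_instance

-- ===== CLAIM (what is proved, stated in full; the proofs are below) =====
def Claim_equal_untokenizing : Prop := ∀ (tokenized_text : List String) (idx : List Bool), Dom_untokenizing tokenized_text idx → Pre_untokenizing tokenized_text idx → Spec_untokenizing tokenized_text idx (untokenizing tokenized_text idx)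

-- ===== LEMMAS AND PROOFS =====

-- the token fetched at cursor l (the value both ports read)
def pvTok (tt : List String) (l : Int) : String := (PySem.List.pyGet? tt l).getD ""

-- the tokens of a run of n True flags starting at cursor l
def pvToks (tt : List String) (l : Int) (n : Nat) : List String :=
  (List.range n).map (fun (j : Nat) => pvTok tt (l + (j : Int)))

lemma pvToks_succ (tt : List String) (l : Int) (k : Nat) :
    pvToks tt l (k + 1) = pvTok tt l :: pvToks tt (l + 1) k := by
  unfold pvToks
  rw [List.range_succ_eq_map, List.map_cons, List.map_map]
  simp only [Nat.cast_zero, add_zero]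
  congr 1
  apply List.map_congr_left
  intro j hj
  simp only [Function.comp]
  congr 1
  push_cast; ring

-- A's accumulator step on tmp_
def pvAcc (tmp t : String) : String := if tmp == "" then t else tmp ++ " " ++ t

-- structural-recursion rendering of A's loop (the rest of the output from state (l, tmp))
def pvGoA (tt : List String) : List Bool → Int → String → List String
  | [], _, tmp => if tmp != "" then [PySem.Str.strip tmp] else []
  | i :: xs, l, tmp =>
    if i == true then pvGoA tt xs (l + 1) (pvAcc tmp (pvTok tt l))
    else if tmp != "" then PySem.Str.strip tmp :: pvGoA tt xs l "" else pvGoA tt xs l tmp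

-- named copies of A's loop step and final flush (proof bookkeeping only)
def pvStepA (tt : List String) (st : Int × List String × String) (i : Bool) : Int × List String × String :=
  if i == true then
    (st.1 + 1, st.2.1,
      if st.2.2 == "" then (PySem.List.pyGet? tt st.1).getD ""
      else st.2.2 ++ " " ++ (PySem.List.pyGet? tt st.1).getD "")
  else
    if st.2.2 != "" then (st.1, st.2.1 ++ [PySem.Str.strip st.2.2], "")
    else st

def pvFinA (st : Int × List String × String) : List String :=
  if st.2.2 != "" then st.2.1 ++ [PySem.Str.strip st.2.2] else st.2.1

lemma untokenizing_eq_goA_aux (tt : List String) (idx : List Bool) :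
    ∀ (l : Int) (text : List String) (tmp : String),
      pvFinA (idx.foldl (pvStepA tt) (l, text, tmp)) = text ++ pvGoA tt idx l tmp := by
  induction idx with
  | nil => intro l text tmp; by_cases h : tmp = "" <;> simp [pvFinA, pvGoA, h]
  | cons i xs ih =>
    intro l text tmp
    rw [List.foldl_cons]
    cases i with
    | true =>
      have hs : pvStepA tt (l, text, tmp) true
          = (l + 1, text, pvAcc tmp (pvTok tt l)) := by
        simp [pvStepA, pvAcc, pvTok]
      rw [hs, ih, pvGoA]
      simp
    | false =>
      by_cases h : tmp = ""
      · have hs : pvStepA tt (l, text, tmp) false = (l, text, tmp) := by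
          simp [pvStepA, h]
        rw [hs, ih]
        simp [pvGoA, h]
      · have hs : pvStepA tt (l, text, tmp) false
            = (l, text ++ [PySem.Str.strip tmp], "") := by
          simp [pvStepA, h]
        rw [hs, ih]
        simp [pvGoA, h]

lemma untokenizing_eq_goA (tt : List String) (idx : List Bool) :
    untokenizing tt idx = pvGoA tt idx 0 "" := by
  have h : untokenizing tt idx = pvFinA (idx.foldl (pvStepA tt) (0, [], "")) := rfl
  rw [h]
  simpa using untokenizing_eq_goA_aux tt idx 0 [] ""

-- A's accumulator folded over a whole run's tokens
def pvListAcc (tmp : String) (ts : List String) : String := ts.foldl pvAcc tmp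

-- what " ".join appends after the first token
def pvJoinTail : List String → String
  | [] => ""
  | t :: ts => " " ++ t ++ pvJoinTail ts

lemma pvTakeRun_decomp (x : Bool) (ys : List Bool) :
    ys = List.replicate (pvTakeRun x ys).1 x ++ (pvTakeRun x ys).2 ∧
      (∀ z zs, (pvTakeRun x ys).2 = z :: zs → z ≠ x) := by
  induction ys with
  | nil => exact ⟨rfl, by intro z zs h; simp [pvTakeRun] at h⟩
  | cons y ys ih =>
    by_cases h : y = x
    · subst h
      constructor
      · conv_lhs => rw [ih.1]
        simp [pvTakeRun, List.replicate_succ]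
      · intro z zs hz
        apply ih.2 z zs
        simpa [pvTakeRun] using hz
    · constructor
      · simp [pvTakeRun, h]
      · intro z zs hz
        simp [pvTakeRun, h] at hz
        rcases hz with ⟨rfl, rfl⟩
        exact h

-- A skips a run of False flags when tmp is empty
lemma pvGoA_false_run (tt : List String) (k : Nat) (rest : List Bool) (l : Int) :
    pvGoA tt (List.replicate k false ++ rest) l "" = pvGoA tt rest l "" := by
  induction k with
  | zero => simp
  | succ k ih => simpa [List.replicate_succ, pvGoA] using ih

-- A folds its accumulator over a run of True flags
lemma pvGoA_true_run (tt : List String) (k : Nat) :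
    ∀ (rest : List Bool) (l : Int) (tmp : String),
      pvGoA tt (List.replicate k true ++ rest) l tmp =
        pvGoA tt rest (l + (k : Int)) (pvListAcc tmp (pvToks tt l k)) := by
  induction k with
  | zero => simp [pvListAcc, pvToks]
  | succ k ih =>
    intro rest l tmp
    rw [List.replicate_succ, List.cons_append]
    show pvGoA tt (true :: _) l tmp = _
    rw [pvGoA]
    simp only [BEq.rfl, if_true, ih, pvToks_succ]
    congr 1
    push_cast; ring

lemma pvAppend_space_ne (tmp t : String) : tmp ++ " " ++ t ≠ "" := by
  intro h
  have := congrArg String.toList h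
  simp [String.toList_append] at this

lemma pvListAcc_eq_empty_iff (ts : List String) : ∀ tmp,
    pvListAcc tmp ts = "" ↔ tmp = "" ∧ ∀ t ∈ ts, t = "" := by
  induction ts with
  | nil => intro tmp; simp [pvListAcc]
  | cons t ts ih =>
    intro tmp
    have h1 : pvListAcc tmp (t :: ts) = pvListAcc (pvAcc tmp t) ts := rfl
    rw [h1, ih]
    by_cases h : tmp = ""
    · simp [pvAcc, h]
    · simp only [pvAcc, beq_iff_eq, h, if_false]
      simp [pvAppend_space_ne tmp t]

lemma pvListAcc_of_ne (ts : List String) : ∀ tmp, tmp ≠ "" →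
    pvListAcc tmp ts = tmp ++ pvJoinTail ts := by
  induction ts with
  | nil => intro tmp _; simp [pvListAcc, pvJoinTail]
  | cons t ts ih =>
    intro tmp h
    have h1 : pvListAcc tmp (t :: ts) = pvListAcc (tmp ++ " " ++ t) ts := by
      simp [pvListAcc, List.foldl_cons, pvAcc, h]
    rw [h1, ih _ (pvAppend_space_ne tmp t), pvJoinTail]
    simp [String.append_assoc]

lemma pvJoin_cons (t : String) (ts : List String) :
    PySem.Str.join " " (t :: ts) = t ++ pvJoinTail ts := by
  induction ts generalizing t with
  | nil => apply String.toList_inj.mp; simp [PySem.Str.toList_join, pvJoinTail, PySem.Chars.join_singleton]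
  | cons u ts ih =>
    apply String.toList_inj.mp
    have h2 := congrArg String.toList (ih u)
    simp only [PySem.Str.toList_join, List.map_cons, PySem.Chars.join_cons_cons,
      String.toList_append] at *
    rw [h2]
    simp [pvJoinTail, String.toList_append]

lemma pvStrip_space (s : String) :
    PySem.Str.strip (" " ++ s) = PySem.Str.strip s := by
  apply String.toList_inj.mp
  simp only [PySem.Str.toList_strip, String.toList_append]
  have h : (" " : String).toList = [' '] := rfl
  rw [h]
  show PySem.Chars.strip (' ' :: s.toList) = _
  simp [PySem.Chars.strip, PySem.Chars.lstrip, show PySem.Chars.isspace ' ' = true from rfl]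

lemma pvListAcc_strip (ts : List String) (h : pvListAcc "" ts ≠ "") :
    PySem.Str.strip (pvListAcc "" ts) = PySem.Str.strip (PySem.Str.join " " ts) := by
  induction ts with
  | nil => simp [pvListAcc] at h
  | cons t ts ih =>
    have h1 : pvListAcc "" (t :: ts) = pvListAcc t ts := by simp [pvListAcc, pvAcc]
    by_cases ht : t = ""
    · subst ht
      rw [h1] at h ⊢
      have hts : ts ≠ [] := by rintro rfl; simp [pvListAcc] at h
      obtain ⟨u, ts', rfl⟩ := List.exists_cons_of_ne_nil hts
      rw [ih h]
      have hj : PySem.Str.join " " ("" :: u :: ts') = " " ++ PySem.Str.join " " (u :: ts') := by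
        apply String.toList_inj.mp
        simp [PySem.Str.toList_join, PySem.Chars.join_cons_cons, String.toList_append]
      rw [hj, pvStrip_space]
    · rw [h1, pvListAcc_of_ne ts t ht, pvJoin_cons]

-- flush at a run boundary (rest empty or starting with False)
lemma pvGoA_flush (tt : List String) (rest : List Bool) (l : Int) (tmp : String)
    (h : rest = [] ∨ ∃ zs, rest = false :: zs) :
    pvGoA tt rest l tmp =
      (if tmp != "" then [PySem.Str.strip tmp] else []) ++ pvGoA tt rest l "" := by
  rcases h with rfl | ⟨zs, rfl⟩
  · by_cases h : tmp = "" <;> simp [pvGoA, h]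
  · by_cases h : tmp = "" <;> simp [pvGoA, h]

lemma pvGoA_eq_goB_aux (tt : List String) : ∀ (n : Nat) (idx : List Bool), idx.length ≤ n →
    ∀ (l : Int), pvGoA tt idx l "" = pvGoB tt idx l := by
  intro n
  induction n with
  | zero =>
    intro idx h l
    have : idx = [] := List.length_eq_zero_iff.mp (Nat.le_zero.mp h)
    subst this
    simp [pvGoA, pvGoB]
  | succ n ih =>
    intro idx h l
    match idx with
    | [] => simp [pvGoA, pvGoB]
    | x :: xs =>
      obtain ⟨hdec, hhead⟩ := pvTakeRun_decomp x xs
      have hlen : (pvTakeRun x xs).2.length ≤ n := by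
        have := pvTakeRun_len x xs
        simp only [List.length_cons] at h
        omega
      have hcons : x :: xs
          = List.replicate ((pvTakeRun x xs).1 + 1) x ++ (pvTakeRun x xs).2 := by
        rw [List.replicate_succ, List.cons_append]
        exact congrArg _ hdec
      cases x with
      | false =>
        rw [pvGoB]
        simp only [show ((false == true) = false) from rfl, Bool.false_eq_true, if_false]
        rw [hcons, pvGoA_false_run]
        exact ih _ hlen l
      | true =>
        have hrest : (pvTakeRun true xs).2 = [] ∨ ∃ zs, (pvTakeRun true xs).2 = false :: zs := by
          cases hr : (pvTakeRun true xs).2 with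
          | nil => exact Or.inl rfl
          | cons z zs =>
            refine Or.inr ⟨zs, ?_⟩
            have hz := hhead z zs hr
            cases z
            · rfl
            · exact absurd rfl hz
        rw [pvGoB]
        simp only [BEq.rfl, if_true]
        conv_lhs => rw [hcons]
        rw [pvGoA_true_run]
        have htoks : (List.range ((pvTakeRun true xs).1 + 1)).map
            (fun (j : Nat) => (PySem.List.pyGet? tt (l + (j : Int))).getD "")
            = pvToks tt l ((pvTakeRun true xs).1 + 1) := rfl
      -- flush the run's accumulated string, then recurse on the rest
        rw [pvGoA_flush tt _ _ _ hrest, ih _ hlen]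
        rw [htoks]
        congr 1
        by_cases hz : pvListAcc "" (pvToks tt l ((pvTakeRun true xs).1 + 1)) = ""
        · have hall := (pvListAcc_eq_empty_iff _ "").mp hz
          have : (pvToks tt l ((pvTakeRun true xs).1 + 1)).any (fun t => t != "") = false := by
            simp only [List.any_eq_false, bne_iff_ne, ne_eq, not_not]
            exact hall.2
          rw [this, hz]
          simp
        · have : (pvToks tt l ((pvTakeRun true xs).1 + 1)).any (fun t => t != "") = true := by
            by_contra hc
            simp only [Bool.not_eq_true, List.any_eq_false, bne_iff_ne, ne_eq, not_not] at hc
            exact hz ((pvListAcc_eq_empty_iff _ "").mpr ⟨rfl, hc⟩)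
          rw [this]
          simp only [bne_iff_ne, ne_eq, hz, not_false_eq_true, if_pos trivial]
          rw [pvListAcc_strip _ hz]

-- ===== VERDICT (by name: the statement is the Claim_ definition above) =====
theorem untokenizing_spec : Claim_equal_untokenizing := by
  intro tt idx _ _
  unfold Spec_untokenizing untokenizing_alt
  rw [untokenizing_eq_goA, pvGoA_eq_goB_aux tt idx.length idx le_rfl]
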